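-- pv_equiv track=rewrite | github.com/ugsfume/VQA-Dataset-Process | util/repair_gen/repair_rule_extractor.py | region_to_composes
-- ===== SOURCE A (Python) =====
-- from typing import Dict, List, Tuple, Set, Any, Optional
--
-- COMBO_KEYS = [
--     ("Gate", "Data"),
--     ("Data", "Com"),
--     ("Gate", "Com"),
--     ("Gate", "TFT"),
--     ("Gate", "Drain"),
--     ("Gate", "Mesh"),
--     ("Data", "Drain"),
--     ("Data", "Mesh"),
--     ("Data", "ITO"),
--     ("Gate", "ITO"),
-- ]
--
-- SPECIAL_SAME = {"Data", "Gate"}  # for X&X logic (>=2 blobs)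
--
-- def region_to_composes(present: Set[str], counts: Dict[str, int]) -> Set[str]:
--     """Translate detected components in a region to compose keys."""
--     out: Set[str] = set()
--     # Singles
--     for s in present:
--         out.add(s)
--     # Same-type specials (X&X requires >=2)
--     for s in SPECIAL_SAME:
--         if s in counts and counts[s] >= 2:
--             out.add(f"{s}&{s}")
--     # Pairs
--     for a, b in COMBO_KEYS:
--         if a == b:
--             continue
--         if a in present and b in present:
--             out.add(f"{a}&{b}")
--     return out
-- ===== SOURCE B (Python) =====
-- # B: pair detection is driven off the input, not the table: enumerate unordered pairs of the
-- # relevant components (present restricted to the combo vocabulary) with itertools.combinations and look each up in a frozenset-keyed dict of valid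
-- # combos; matched canonical keys are then emitted in canonical order.  (objective: alternative)
-- from itertools import combinations
--
-- _PAIR_TABLE = [("Gate", "Data"), ("Data", "Com"), ("Gate", "Com"), ("Gate", "TFT"),
--                ("Gate", "Drain"), ("Gate", "Mesh"), ("Data", "Drain"), ("Data", "Mesh"),
--                ("Data", "ITO"), ("Gate", "ITO")]
-- _VALID_PAIRS = {frozenset(p): "%s&%s" % p for p in _PAIR_TABLE}
-- _CANON_ORDER = ["%s&%s" % p for p in _PAIR_TABLE]
-- _COMPONENTS = {c for p in _PAIR_TABLE for c in p}
--
-- def region_to_composes(present, counts):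
--     """Translate detected components in a region to compose keys."""
--     found = set()
--     relevant = _COMPONENTS.intersection(present)
--     for pair in combinations(relevant, 2):
--         key = _VALID_PAIRS.get(frozenset(pair))
--         if key is not None:
--             found.add(key)
--     out = set(present)
--     for s in ("Data", "Gate"):
--         if counts.get(s, 0) >= 2:
--             out.add(s + "&" + s)
--     for k in _CANON_ORDER:
--         if k in found:
--             out.add(k)
--     return out
-- ===== Notes on version B (the rewrite author's own statement) =====
-- stated objective: alternative
-- what changed: B inverts the pair detection: instead of scanning the fixed COMBO_KEYS table and testing 'a in present and b in present' per row, it enumerates unordered pairs of the relevant components (present intersected with the combo vocabulary) via itertools.combinations, looks each up in a frozenset-keyed dict of valid combos, and emits the matched canonical keys in canonical order.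
import Mathlib
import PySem

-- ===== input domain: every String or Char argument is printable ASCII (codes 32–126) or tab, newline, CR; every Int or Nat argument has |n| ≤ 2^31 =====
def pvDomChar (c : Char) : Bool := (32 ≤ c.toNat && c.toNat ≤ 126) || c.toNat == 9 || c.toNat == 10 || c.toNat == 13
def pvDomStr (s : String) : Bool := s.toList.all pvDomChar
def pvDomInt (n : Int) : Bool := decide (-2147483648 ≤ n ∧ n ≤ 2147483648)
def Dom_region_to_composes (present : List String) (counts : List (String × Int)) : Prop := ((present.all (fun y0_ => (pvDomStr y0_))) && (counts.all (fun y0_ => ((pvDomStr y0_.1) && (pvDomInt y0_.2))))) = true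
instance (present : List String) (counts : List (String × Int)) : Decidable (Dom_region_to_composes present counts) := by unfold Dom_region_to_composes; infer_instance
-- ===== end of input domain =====

-- B detects valid pairs from the input (combinations of present, looked up in a frozenset-keyed
-- dict) instead of scanning the fixed table for both-present rows, emitting matches in canonical
-- order (objective: alternative).


-- ===== PORT A =====
def COMBO_KEYS : List (String × String) :=
  [("Gate", "Data"), ("Data", "Com"), ("Gate", "Com"), ("Gate", "TFT"), ("Gate", "Drain"),
   ("Gate", "Mesh"), ("Data", "Drain"), ("Data", "Mesh"), ("Data", "ITO"), ("Gate", "ITO")]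

-- SPECIAL_SAME = {"Data", "Gate"}; Python's hash iteration order over this set is not modelled;
-- it only affects the internal insertion order of the result, which is a set.
def SPECIAL_SAME : PySem.Set String := ["Data", "Gate"]

def region_to_composes (present : List String) (counts : List (String × Int)) : List String :=
  COMBO_KEYS.foldl
    (fun o ab =>
      if ab.1 == ab.2 then o
      else if PySem.Set.contains present ab.1 && PySem.Set.contains present ab.2 then
        PySem.Set.add o (ab.1 ++ "&" ++ ab.2)
      else o)
    (SPECIAL_SAME.foldl
      (fun o s =>
        if (PySem.Dict.mk counts).contains s then
          match (PySem.Dict.mk counts).get? s with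
          | some v => if v ≥ 2 then PySem.Set.add o (s ++ "&" ++ s) else o
          | none => o   -- unreachable: contains s = true means get? s = some _
        else o)
      (present.foldl (fun o s => PySem.Set.add o s) PySem.Set.empty))

-- ===== PORT B =====
def B_PAIR_TABLE : List (String × String) :=
  [("Gate", "Data"), ("Data", "Com"), ("Gate", "Com"), ("Gate", "TFT"), ("Gate", "Drain"),
   ("Gate", "Mesh"), ("Data", "Drain"), ("Data", "Mesh"), ("Data", "ITO"), ("Gate", "ITO")]

-- _VALID_PAIRS.get(frozenset(pair)): first table key equal (as a frozenset) to {x, y}.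
-- Exact here: a two-element frozenset equals a key {a, b} (a ≠ b in every table entry)
-- iff the pair matches (a, b) in either order.
def validPairsGet (x y : String) : List (String × String) → Option String
  | [] => none
  | p :: rest =>
    if (x == p.1 && y == p.2) || (x == p.2 && y == p.1) then some (p.1 ++ "&" ++ p.2)
    else validPairsGet x y rest

def B_CANON_ORDER : List String := B_PAIR_TABLE.map (fun p => p.1 ++ "&" ++ p.2)

-- _COMPONENTS = {c for p in _PAIR_TABLE for c in p}
def B_COMPONENTS : PySem.Set String :=
  PySem.Set.ofList (B_PAIR_TABLE.flatMap (fun p => [p.1, p.2]))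

-- itertools.combinations(l, 2), in order
def combos2 : List String → List (String × String)
  | [] => []
  | x :: xs => xs.map (fun y => (x, y)) ++ combos2 xs

def region_to_composes_alt (present : List String) (counts : List (String × Int)) : List String :=
  let relevant : PySem.Set String := PySem.Set.inter B_COMPONENTS present
  let found : PySem.Set String :=
    (combos2 relevant).foldl
      (fun f p =>
        match validPairsGet p.1 p.2 B_PAIR_TABLE with
        | some k => PySem.Set.add f k
        | none => f)
      PySem.Set.empty
  let out1 : PySem.Set String := PySem.Set.ofList present
  let out2 : PySem.Set String :=
    (["Data", "Gate"] : List String).foldl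
      (fun o s =>
        if decide ((PySem.Dict.mk counts).getD s 0 ≥ 2) then PySem.Set.add o (s ++ "&" ++ s)
        else o)
      out1
  B_CANON_ORDER.foldl
    (fun o k => if PySem.Set.contains found k then PySem.Set.add o k else o) out2

-- ===== PRECONDITION & SPEC =====
def Spec_region_to_composes (present : List String) (counts : List (String × Int)) (out : List String) : Prop := out = region_to_composes_alt present counts
instance (present : List String) (counts : List (String × Int)) (out : List String) : Decidable (Spec_region_to_composes present counts out) := by unfold Spec_region_to_composes; infer_instance

-- ===== CLAIM (what is proved, stated in full; the proofs are below) =====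
def Claim_equal_region_to_composes : Prop := ∀ (present : List String) (counts : List (String × Int)), Dom_region_to_composes present counts → Spec_region_to_composes present counts (region_to_composes present counts)

-- ===== LEMMAS AND PROOFS =====

-- B's found-set: the match-fold is the add-fold of the filterMap
theorem found_eq_ofList_filterMap (l : List (String × String)) (S : List String) :
    l.foldl
      (fun f p =>
        match validPairsGet p.1 p.2 B_PAIR_TABLE with
        | some k => PySem.Set.add f k
        | none => f) S
    = (l.filterMap (fun p => validPairsGet p.1 p.2 B_PAIR_TABLE)).foldl PySem.Set.add S := by
  induction l generalizing S with
  | nil => rfl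
  | cons x xs ih =>
    rcases h : validPairsGet x.1 x.2 B_PAIR_TABLE with _ | k <;>
      simp [List.foldl, h, ih]

theorem mem_combos2 {x y : String} {l : List String} (h : (x, y) ∈ combos2 l) :
    x ∈ l ∧ y ∈ l := by
  induction l with
  | nil => simp [combos2] at h
  | cons a as ih =>
    simp only [combos2, List.mem_append, List.mem_map] at h
    rcases h with ⟨b, hb, he⟩ | h
    · obtain ⟨rfl, rfl⟩ := Prod.mk.injEq .. ▸ he
      exact ⟨List.mem_cons_self, List.mem_cons_of_mem _ hb⟩
    · exact ⟨List.mem_cons_of_mem _ (ih h).1, List.mem_cons_of_mem _ (ih h).2⟩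

theorem exists_combos2 {a b : String} {l : List String} (ha : a ∈ l) (hb : b ∈ l)
    (hne : a ≠ b) : (a, b) ∈ combos2 l ∨ (b, a) ∈ combos2 l := by
  induction l with
  | nil => simp at ha
  | cons x xs ih =>
    rcases List.mem_cons.1 ha with rfl | ha'
    · left
      have hb' : b ∈ xs := by
        rcases List.mem_cons.1 hb with rfl | h
        · exact absurd rfl hne
        · exact h
      simp only [combos2, List.mem_append, List.mem_map]
      exact Or.inl ⟨b, hb', rfl⟩
    · rcases List.mem_cons.1 hb with rfl | hb'
      · right
        simp only [combos2, List.mem_append, List.mem_map]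
        exact Or.inl ⟨a, ha', rfl⟩
      · rcases ih ha' hb' with h | h
        · exact Or.inl (by simp only [combos2, List.mem_append]; exact Or.inr h)
        · exact Or.inr (by simp only [combos2, List.mem_append]; exact Or.inr h)

theorem validPairsGet_inv {x y k : String} {l : List (String × String)}
    (h : validPairsGet x y l = some k) :
    ∃ ab ∈ l, k = ab.1 ++ "&" ++ ab.2 ∧ ((x = ab.1 ∧ y = ab.2) ∨ (x = ab.2 ∧ y = ab.1)) := by
  induction l with
  | nil => simp [validPairsGet] at h
  | cons p rest ih =>
    by_cases hc : ((x == p.1 && y == p.2) || (x == p.2 && y == p.1)) = true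
    · refine ⟨p, List.mem_cons_self, ?_, ?_⟩
      · simp [validPairsGet, hc] at h; exact h.symm
      · simp only [Bool.or_eq_true, Bool.and_eq_true, beq_iff_eq] at hc
        exact hc
    · simp only [validPairsGet, hc, if_neg, Bool.false_eq_true, not_false_eq_true] at h
      obtain ⟨ab, hab, hk⟩ := ih h
      exact ⟨ab, List.mem_cons_of_mem _ hab, hk⟩

-- for each table entry, both orientations look up to its canonical key
theorem validPairsGet_table :
    ∀ ab ∈ B_PAIR_TABLE,
      validPairsGet ab.1 ab.2 B_PAIR_TABLE = some (ab.1 ++ "&" ++ ab.2) ∧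
      validPairsGet ab.2 ab.1 B_PAIR_TABLE = some (ab.1 ++ "&" ++ ab.2) := by decide

theorem canon_nodup : (B_PAIR_TABLE.map (fun p => p.1 ++ "&" ++ p.2)).Nodup := by decide

theorem table_ne : ∀ ab ∈ B_PAIR_TABLE, ab.1 ≠ ab.2 := by decide

theorem table_components :
    ∀ ab ∈ B_PAIR_TABLE, ab.1 ∈ (B_COMPONENTS : List String) ∧ ab.2 ∈ (B_COMPONENTS : List String) := by
  decide

-- characterization of B's found set on the table entries
theorem mem_found_iff (present : List String) (ab : String × String)
    (hab : ab ∈ B_PAIR_TABLE) :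
    (ab.1 ++ "&" ++ ab.2) ∈
        (combos2 (PySem.Set.inter B_COMPONENTS present)).foldl
          (fun f p =>
            match validPairsGet p.1 p.2 B_PAIR_TABLE with
            | some k => PySem.Set.add f k
            | none => f)
          PySem.Set.empty
      ↔ ab.1 ∈ present ∧ ab.2 ∈ present := by
  rw [found_eq_ofList_filterMap,
    show (PySem.Set.empty : PySem.Set String) = ([] : List String) from rfl,
    ← PySem.Set.ofList_eq_foldl, PySem.Set.mem_ofList, List.mem_filterMap]
  constructor
  · rintro ⟨p, hp, hsome⟩
    obtain ⟨cd, hcd, hk, hor⟩ := validPairsGet_inv hsome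
    have hcdab : cd = ab := List.inj_on_of_nodup_map canon_nodup hcd hab hk.symm
    obtain ⟨hx', hy'⟩ := mem_combos2 hp
    have hx : p.1 ∈ present := ((PySem.Set.mem_inter _ _ _).1 hx').2
    have hy : p.2 ∈ present := ((PySem.Set.mem_inter _ _ _).1 hy').2
    subst hcdab
    rcases hor with ⟨h1, h2⟩ | ⟨h1, h2⟩
    · exact ⟨h1 ▸ hx, h2 ▸ hy⟩
    · exact ⟨h2 ▸ hy, h1 ▸ hx⟩
  · rintro ⟨ha, hb⟩
    obtain ⟨hfwd, hbwd⟩ := validPairsGet_table ab hab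
    obtain ⟨hc1, hc2⟩ := table_components ab hab
    have ha' : ab.1 ∈ PySem.Set.inter B_COMPONENTS present := (PySem.Set.mem_inter _ _ _).2 ⟨hc1, ha⟩
    have hb' : ab.2 ∈ PySem.Set.inter B_COMPONENTS present := (PySem.Set.mem_inter _ _ _).2 ⟨hc2, hb⟩
    rcases exists_combos2 ha' hb' (table_ne ab hab) with h | h
    · exact ⟨(ab.1, ab.2), h, hfwd⟩
    · exact ⟨(ab.2, ab.1), h, hbwd⟩

-- B's emission loop over the canonical key list, re-read over the pair table
theorem foldl_canon_eq_foldl_table (found S : List String) :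
    B_CANON_ORDER.foldl
      (fun o k => if PySem.Set.contains found k then PySem.Set.add o k else o) S
    = B_PAIR_TABLE.foldl
        (fun o ab =>
          if PySem.Set.contains found (ab.1 ++ "&" ++ ab.2) then
            PySem.Set.add o (ab.1 ++ "&" ++ ab.2)
          else o) S := by
  rw [B_CANON_ORDER, List.foldl_map]

-- A's guarded-lookup step equals B's getD test
theorem special_step_eq (counts : List (String × Int)) (o : List String) (s : String) :
    (if (PySem.Dict.mk counts).contains s then
        match (PySem.Dict.mk counts).get? s with
        | some v => if v ≥ 2 then PySem.Set.add o (s ++ "&" ++ s) else o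
        | none => o
      else o)
    = (if decide ((PySem.Dict.mk counts).getD s 0 ≥ 2) then
        PySem.Set.add o (s ++ "&" ++ s) else o) := by
  rcases h : (PySem.Dict.mk counts).get? s with _ | v <;>
    simp [PySem.Dict.contains_eq_isSome_get?, h,
      PySem.Dict.getD_eq_get?_getD]

-- ===== VERDICT (by name: the statement is the Claim_ definition above) =====
theorem region_to_composes_spec : Claim_equal_region_to_composes := by
  intro present counts _
  unfold Spec_region_to_composes region_to_composes region_to_composes_alt
  dsimp only
  have h1 : present.foldl (fun o s => PySem.Set.add o s) PySem.Set.empty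
      = PySem.Set.ofList present := rfl
  have hfun : (fun (o : List String) (s : String) =>
      if (PySem.Dict.mk counts).contains s then
        match (PySem.Dict.mk counts).get? s with
        | some v => if v ≥ 2 then PySem.Set.add o (s ++ "&" ++ s) else o
        | none => o
      else o)
      = (fun (o : List String) (s : String) =>
          if decide ((PySem.Dict.mk counts).getD s 0 ≥ 2) then
            PySem.Set.add o (s ++ "&" ++ s) else o) :=
    funext fun o => funext fun s => special_step_eq counts o s
  rw [h1, show SPECIAL_SAME = (["Data", "Gate"] : List String) from rfl, hfun,
    foldl_canon_eq_foldl_table, show COMBO_KEYS = B_PAIR_TABLE from rfl]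
  refine (PySem.List.foldl_congr_mem' _ _ _ _ ?_).symm
  intro ab hab o
  have hm := mem_found_iff present ab hab
  have hne : (ab.1 == ab.2) = false := beq_eq_false_iff_ne.2 (table_ne ab hab)
  simp only [show (PySem.Set.empty : PySem.Set String) = ([] : List String) from rfl] at hm
  by_cases hcontains : (ab.1 ++ "&" ++ ab.2) ∈
      (combos2 (PySem.Set.inter B_COMPONENTS present)).foldl
        (fun f p =>
          match validPairsGet p.1 p.2 B_PAIR_TABLE with
          | some k => PySem.Set.add f k
          | none => f)
        ([] : List String)
  · obtain ⟨hx, hy⟩ := hm.1 hcontains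
    simp [PySem.Set.empty, hcontains, hne, hx, hy]
  · have : ¬ (ab.1 ∈ present ∧ ab.2 ∈ present) := fun h => hcontains (hm.2 h)
    by_cases hx : ab.1 ∈ present <;> by_cases hy : ab.2 ∈ present <;>
      simp_all [PySem.Set.empty]
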